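-- pv_equiv track=rewrite | github.com/internetkillls/Obsidian-Otto | src/otto/tooling/obsidian_scan.py | _extract_structured_tags
-- ===== SOURCE A (Python) =====
-- SCARCITY_TAG_KEYS = {
--     "scarcity": True,
--     "necessity": False,
--     "artificial": False,
--     "orientation": False,
--     "allocation": False,
--     "cluster": True,
--     "cluster_membership": True,
-- }
--
-- def _extract_structured_tags(tags: list[str]) -> dict[str, list[str]]:
--     metadata: dict[str, list[str]] = {key: [] for key in SCARCITY_TAG_KEYS}
--     for tag in tags:
--         raw = tag.strip()
--         lowered = raw.lower()
--         for key in SCARCITY_TAG_KEYS: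
--             prefixes = [f"{key}/", f"{key}_", f"{key}-"]
--             match = next((prefix for prefix in prefixes if lowered.startswith(prefix)), None)
--             if match is None:
--                 continue
--             suffix = raw[len(match):].strip()
--             if suffix:
--                 metadata[key].append(suffix)
--             break
--     return metadata
-- ===== SOURCE B (Python) =====
-- SCARCITY_TAG_KEYS = {
--     "scarcity": True,
--     "necessity": False,
--     "artificial": False,
--     "orientation": False,
--     "allocation": False,
--     "cluster": True,
--     "cluster_membership": True,
-- }
--
-- def _extract_structured_tags(tags: list[str]) -> dict[str, list[str]]:
--     metadata: dict[str, list[str]] = {key: [] for key in SCARCITY_TAG_KEYS}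
--     for tag in tags:
--         raw = tag.strip()
--         i = next((j for j, ch in enumerate(raw)
--                   if ch == "/" or ch == "_" or ch == "-"), None)
--         if i is None:
--             continue
--         key = raw[:i].lower()
--         if key in SCARCITY_TAG_KEYS:
--             suffix = raw[i + 1:].strip()
--             if suffix:
--                 metadata[key].append(suffix)
--     return metadata
-- ===== Notes on version B (the rewrite author's own statement) =====
-- stated objective: idiomatic
-- what changed: B replaces A's inner loop over all 7 keys x 3 startswith-prefixes per tag by a single parse: find the first separator in the stripped tag, lowercase the part before it, and do one dict-membership lookup.
import Mathlib
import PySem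

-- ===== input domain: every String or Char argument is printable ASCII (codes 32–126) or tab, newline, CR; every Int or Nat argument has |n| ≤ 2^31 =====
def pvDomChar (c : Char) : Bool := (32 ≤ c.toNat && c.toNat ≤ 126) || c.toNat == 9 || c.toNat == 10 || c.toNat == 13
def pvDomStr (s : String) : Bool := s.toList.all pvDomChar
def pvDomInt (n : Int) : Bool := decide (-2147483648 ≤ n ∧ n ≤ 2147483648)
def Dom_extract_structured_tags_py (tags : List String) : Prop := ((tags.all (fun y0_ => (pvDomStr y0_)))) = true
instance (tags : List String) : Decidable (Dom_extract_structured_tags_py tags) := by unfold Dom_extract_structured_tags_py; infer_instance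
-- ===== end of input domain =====

set_option maxRecDepth 4096


-- B replaces A's inner loop over all 7 keys × 3 startswith-prefixes per tag by a single parse
-- (first separator, lowercase the part before it, one key lookup); objective: idiomatic, same output.

-- ===== PORT A =====
def pvKeysA : List String := ["scarcity","necessity","artificial","orientation","allocation","cluster","cluster_membership"]

-- inner 'for key in SCARCITY_TAG_KEYS' loop with break
def pvInnerA (d : PySem.Dict String (List String)) (raw lowered : String) : List String → PySem.Dict String (List String)
  | [] => d
  | k :: rest =>
    match ([k ++ "/", k ++ "_", k ++ "-"].find? (fun p => PySem.Str.startswith lowered p)) with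
    | none => pvInnerA d raw lowered rest
    | some m =>
      let suffix := PySem.Str.strip (PySem.Str.slice raw (some (PySem.Str.len m : Int)) none)
      if suffix = "" then d else d.modify k [] (fun l => l ++ [suffix])

-- per-tag body of A's outer loop
def pvStepA (d : PySem.Dict String (List String)) (tag : String) : PySem.Dict String (List String) :=
  let raw := PySem.Str.strip tag
  let lowered := PySem.Str.lower raw
  pvInnerA d raw lowered pvKeysA

def extract_structured_tags_py (tags : List String) : List (String × List String) :=
  let d0 := pvKeysA.foldl (fun d k => d.insert k ([] : List String)) PySem.Dict.empty
  (tags.foldl pvStepA d0).items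

-- ===== PORT B =====
def pvKeysB : List String := ["scarcity","necessity","artificial","orientation","allocation","cluster","cluster_membership"]

-- ch == "/" or ch == "_" or ch == "-"
def pvSep (c : Char) : Bool := c == '/' || c == '_' || c == '-'

def pvStepB (d : PySem.Dict String (List String)) (tag : String) : PySem.Dict String (List String) :=
  let raw := PySem.Str.strip tag
  match raw.toList.findIdx? pvSep with   -- next((j for j, ch in enumerate(raw) if …), None)
  | none => d
  | some i =>
    let key := PySem.Str.lower (PySem.Str.slice raw none (some (i : Int)))
    if pvKeysB.contains key then
      let suffix := PySem.Str.strip (PySem.Str.slice raw (some ((i : Int) + 1)) none)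
      if suffix = "" then d else d.modify key [] (fun l => l ++ [suffix])
    else d

def extract_structured_tags_py_alt (tags : List String) : List (String × List String) :=
  let d0 := pvKeysB.foldl (fun d k => d.insert k ([] : List String)) PySem.Dict.empty
  (tags.foldl pvStepB d0).items

-- ===== PRECONDITION & SPEC =====
def Spec_extract_structured_tags_py (tags : List String) (out : List (String × List String)) : Prop := out = extract_structured_tags_py_alt tags
instance (tags : List String) (out : List (String × List String)) : Decidable (Spec_extract_structured_tags_py tags out) := by unfold Spec_extract_structured_tags_py; infer_instance

-- ===== CLAIM (what is proved, stated in full; the proofs are below) =====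
def Claim_equal_extract_structured_tags_py : Prop := ∀ (tags : List String), Dom_extract_structured_tags_py tags → Spec_extract_structured_tags_py tags (extract_structured_tags_py tags)

-- ===== LEMMAS AND PROOFS =====

theorem char_beq_toNat (c d : Char) : (c == d) = decide (c.toNat = d.toNat) := by
  by_cases h : c.toNat = d.toNat
  · have hcd : c = d := Char.ext (UInt32.toNat_inj.mp (by simpa only [Char.toNat] using h))
    subst hcd; simp
  · rw [decide_eq_false h, beq_eq_false_iff_ne]
    exact fun hh => h (hh ▸ rfl)

theorem pvSep_lowerChar (c : Char) : pvSep (PySem.Chars.lowerChar c) = pvSep c := by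
  unfold PySem.Chars.lowerChar
  split
  · next h =>
    simp only [PySem.Chars.isupper, Bool.and_eq_true, decide_eq_true_eq, Char.le_def,
      UInt32.le_iff_toNat_le] at h
    have h' : 65 ≤ c.toNat ∧ c.toNat ≤ 90 := h
    have hv : (Char.ofNat (c.toNat + 32)).toNat = c.toNat + 32 := by
      rw [Char.toNat_ofNat, if_pos]
      exact Or.inl (by omega)
    simp only [pvSep, char_beq_toNat, hv]
    have e1 : ('/' : Char).toNat = 47 := rfl
    have e2 : ('_' : Char).toNat = 95 := rfl
    have e3 : ('-' : Char).toNat = 45 := rfl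
    rw [e1, e2, e3]
    simp only [decide_eq_false (by omega : ¬(c.toNat + 32 = 47)),
      decide_eq_false (by omega : ¬(c.toNat + 32 = 95)),
      decide_eq_false (by omega : ¬(c.toNat + 32 = 45)),
      decide_eq_false (by omega : ¬(c.toNat = 47)),
      decide_eq_false (by omega : ¬(c.toNat = 95)),
      decide_eq_false (by omega : ¬(c.toNat = 45))]
  · rfl

-- findIdx? for separators is the same on the lowered string
theorem findIdx_lower (L : List Char) :
    (PySem.Chars.lower L).findIdx? pvSep = L.findIdx? pvSep := by
  unfold PySem.Chars.lower
  rw [List.findIdx?_map]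
  congr 1
  funext c
  exact pvSep_lowerChar c

-- 'lowered.startswith(key + sep)' characterised by take / getElem?
theorem sw_iff (s k : List Char) (sep : Char) :
    PySem.Chars.startswith s (k ++ [sep]) = true ↔ s.take k.length = k ∧ s[k.length]? = some sep := by
  rw [PySem.Chars.startswith_iff]
  constructor
  · intro h
    have hlen : k.length + 1 ≤ s.length := by
      simpa using h.length_le
    have htake := List.prefix_iff_eq_take.mp h
    rw [List.length_append, List.length_singleton, List.take_add_one] at htake
    have hget : s[k.length]? = some sep := by
      rcases hg : s[k.length]? with _ | c
      · rw [List.getElem?_eq_none_iff] at hg; omega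
      · rw [hg] at htake
        simp only [Option.toList_some] at htake
        obtain ⟨h1, h2⟩ := List.append_inj' htake (by rfl)
        simp at h2; rw [h2]
    refine ⟨?_, hget⟩
    rw [hget] at htake
    simp only [Option.toList_some] at htake
    exact ((List.append_inj' htake rfl).1).symm
  · rintro ⟨h1, h2⟩
    rw [List.prefix_iff_eq_take, List.length_append, List.length_singleton, List.take_add_one, h2]
    simp [h1]

-- a Bool-level check that a key contains no separator
theorem no_sep_of_all (k : List Char) (h : k.all (fun c => !pvSep c) = true) :
    ∀ c ∈ k, pvSep c = false := by
  simpa [List.all_eq_true] using h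

-- startswith is false for every separator-suffixed prefix when the string has no separator
theorem sw_none (s k : List Char) (sep : Char) (hsep : pvSep sep = true)
    (hnone : s.findIdx? pvSep = none) :
    PySem.Chars.startswith s (k ++ [sep]) = false := by
  rw [Bool.eq_false_iff]
  intro h
  obtain ⟨-, hget⟩ := (sw_iff s k sep).mp h
  obtain ⟨hlt, hEq⟩ := List.getElem?_eq_some_iff.mp hget
  have := (List.findIdx?_eq_none_iff.mp hnone) s[k.length] (List.getElem_mem hlt)
  rw [hEq, hsep] at this
  exact Bool.true_eq_false.mp this

-- a separator-free prefix followed by a separator pins down findIdx?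
theorem findIdx_at (s k : List Char) (sep : Char)
    (hk : ∀ c ∈ k, pvSep c = false)
    (htake : s.take k.length = k) (hget : s[k.length]? = some sep) (hsep : pvSep sep = true) :
    s.findIdx? pvSep = some k.length := by
  obtain ⟨hlt, hEq⟩ := List.getElem?_eq_some_iff.mp hget
  rw [List.findIdx?_eq_some_iff_getElem]
  refine ⟨hlt, by rw [hEq]; exact hsep, ?_⟩
  intro j hj
  have hjk : j < k.length := hj
  have e1 : (s.take k.length)[j]? = s[j]? := by
    rw [List.getElem?_take]; simp [hj]
  have e2 : s[j]? = some (k[j]'hjk) := by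
    rw [← e1, htake]
    exact List.getElem?_eq_getElem hjk
  obtain ⟨hlt2, hEq2⟩ := List.getElem?_eq_some_iff.mp e2
  rw [hEq2, hk _ (List.getElem_mem _)]
  exact Bool.false_ne_true

-- under findIdx? = some i, a separator-free key can only match at position i with the right prefix
theorem sw_some_false (s k : List Char) (sep : Char) (i : Nat)
    (hk : ∀ c ∈ k, pvSep c = false) (hsep : pvSep sep = true)
    (hfind : s.findIdx? pvSep = some i)
    (hne : s.take i ≠ k) :
    PySem.Chars.startswith s (k ++ [sep]) = false := by
  rw [Bool.eq_false_iff]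
  intro h
  obtain ⟨htake, hget⟩ := (sw_iff s k sep).mp h
  have := findIdx_at s k sep hk htake hget hsep
  rw [hfind] at this
  have hi : i = k.length := Option.some_inj.mp this
  exact hne (hi ▸ htake)

-- "cluster_membership" never matches when the prefix before the first separator is not "cluster"
theorem sw_cm_false (s : List Char) (sep : Char) (i : Nat)
    (hfind : s.findIdx? pvSep = some i)
    (hne : s.take i ≠ "cluster".toList) :
    PySem.Chars.startswith s ("cluster_membership".toList ++ [sep]) = false := by
  rw [Bool.eq_false_iff]
  intro h
  obtain ⟨htake, hget⟩ := (sw_iff s _ sep).mp h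
  have hlen : "cluster_membership".toList.length = 18 := by decide
  have htake18 : s.take 18 = "cluster_membership".toList := by rw [← hlen]; exact htake
  have htake7 : s.take 7 = "cluster".toList := by
    have h7 : (s.take 18).take 7 = "cluster".toList := by rw [htake18]; simp
    rwa [List.take_take] at h7
  have hget7 : s[7]? = some '_' := by
    have e : (s.take 18)[7]? = s[7]? := by
      rw [List.getElem?_take]; simp
    rw [← e, htake18]; simp
  have := findIdx_at s "cluster".toList '_' (no_sep_of_all _ (by decide)) htake7 hget7 (by decide)
  rw [hfind] at this
  have hi : i = 7 := by
    have h' := Option.some_inj.mp this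
    simpa using h'
  exact hne (hi ▸ htake7)

-- evaluate A's inner find? over the three prefixes
theorem str_sw_eq (lw kstr cs : String) (c : Char) (hc : cs.toList = [c]) :
    PySem.Str.startswith lw (kstr ++ cs) = PySem.Chars.startswith lw.toList (kstr.toList ++ [c]) := by
  rw [PySem.Str.startswith_eq, String.toList_append, hc]

theorem find3_none (lw kstr : String)
    (h : ∀ sep, pvSep sep = true → PySem.Chars.startswith lw.toList (kstr.toList ++ [sep]) = false) :
    ([kstr ++ "/", kstr ++ "_", kstr ++ "-"].find? (fun p => PySem.Str.startswith lw p)) = none := by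
  rw [List.find?_cons_of_neg, List.find?_cons_of_neg, List.find?_cons_of_neg]
  · rfl
  · simp only [str_sw_eq lw kstr "-" '-' rfl, h '-' (by decide)]; exact Bool.false_ne_true
  · simp only [str_sw_eq lw kstr "_" '_' rfl, h '_' (by decide)]; exact Bool.false_ne_true
  · simp only [str_sw_eq lw kstr "/" '/' rfl, h '/' (by decide)]; exact Bool.false_ne_true

-- skip a non-matching separator-free key in A's inner loop
theorem innerA_skip (d : PySem.Dict String (List String)) (r : String) (i : Nat) (kstr : String)
    (rest : List String)
    (hk : ∀ c ∈ kstr.toList, pvSep c = false)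
    (hfindLL : (PySem.Str.lower r).toList.findIdx? pvSep = some i)
    (hne : (PySem.Str.lower r).toList.take i ≠ kstr.toList) :
    pvInnerA d r (PySem.Str.lower r) (kstr :: rest) = pvInnerA d r (PySem.Str.lower r) rest := by
  rw [pvInnerA, find3_none]
  intro sep hsep
  exact sw_some_false _ _ sep i hk hsep hfindLL hne

theorem innerA_skip_cm (d : PySem.Dict String (List String)) (r : String) (i : Nat)
    (rest : List String)
    (hfindLL : (PySem.Str.lower r).toList.findIdx? pvSep = some i)
    (hne : (PySem.Str.lower r).toList.take i ≠ "cluster".toList) :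
    pvInnerA d r (PySem.Str.lower r) ("cluster_membership" :: rest) = pvInnerA d r (PySem.Str.lower r) rest := by
  rw [pvInnerA, find3_none]
  intro sep _
  exact sw_cm_false _ sep i hfindLL hne

theorem innerA_skip_none (d : PySem.Dict String (List String)) (r : String) (kstr : String)
    (rest : List String)
    (hnone : (PySem.Str.lower r).toList.findIdx? pvSep = none) :
    pvInnerA d r (PySem.Str.lower r) (kstr :: rest) = pvInnerA d r (PySem.Str.lower r) rest := by
  rw [pvInnerA, find3_none]
  intro sep hsep
  exact sw_none _ _ sep hsep hnone

-- a matching key consumes the tag and produces the suffix bucket update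
theorem innerA_matched (d : PySem.Dict String (List String)) (r : String) (i : Nat) (kstr : String)
    (rest : List String)
    (hfindLL : (PySem.Str.lower r).toList.findIdx? pvSep = some i)
    (htake : (PySem.Str.lower r).toList.take i = kstr.toList) :
    pvInnerA d r (PySem.Str.lower r) (kstr :: rest) =
      (if PySem.Str.strip (PySem.Str.slice r (some ((i : Int) + 1)) none) = "" then d
       else d.modify kstr []
         (fun l => l ++ [PySem.Str.strip (PySem.Str.slice r (some ((i : Int) + 1)) none)])) := by
  obtain ⟨hlt, hPi, hmin⟩ := List.findIdx?_eq_some_iff_getElem.mp hfindLL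
  have hlen : i = kstr.toList.length := by
    have hl := congrArg List.length htake
    rw [List.length_take] at hl
    omega
  have hget : (PySem.Str.lower r).toList[i]? = some ((PySem.Str.lower r).toList[i]'hlt) :=
    List.getElem?_eq_getElem hlt
  have htake' : (PySem.Str.lower r).toList.take kstr.toList.length = kstr.toList := hlen ▸ htake
  have hswTrue : ∀ c : Char, (PySem.Str.lower r).toList[i]'hlt = c →
      PySem.Chars.startswith (PySem.Str.lower r).toList (kstr.toList ++ [c]) = true := by
    intro c hc
    refine (sw_iff _ _ _).mpr ⟨htake', ?_⟩
    rw [← hlen, hget, hc]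
  have hswFalse : ∀ c : Char, (PySem.Str.lower r).toList[i]'hlt ≠ c →
      PySem.Chars.startswith (PySem.Str.lower r).toList (kstr.toList ++ [c]) = false := by
    intro c hc
    rw [Bool.eq_false_iff]
    intro h
    obtain ⟨-, hg⟩ := (sw_iff _ _ _).mp h
    rw [← hlen, hget] at hg
    exact hc (Option.some_inj.mp hg)
  have hL : ∀ (cs : String) (c : Char), cs.toList = [c] →
      (PySem.Str.len (kstr ++ cs) : Int) = (i : Int) + 1 := by
    intro cs c hcs
    rw [PySem.Str.len_eq, String.toList_append, hcs, List.length_append, List.length_singleton,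
      ← hlen]
    push_cast
    ring
  have hsep3 : (PySem.Str.lower r).toList[i]'hlt = '/' ∨ (PySem.Str.lower r).toList[i]'hlt = '_' ∨
      (PySem.Str.lower r).toList[i]'hlt = '-' := by
    simpa [pvSep, or_assoc] using hPi
  rcases hsep3 with hc | hc | hc
  · rw [pvInnerA, List.find?_cons_of_pos
      (by rw [str_sw_eq _ kstr "/" '/' rfl]
          exact hswTrue '/' hc)]
    show (if PySem.Str.strip (PySem.Str.slice r (some (PySem.Str.len (kstr ++ "/"))) none) = "" then d
          else d.modify kstr []
            (fun l => l ++ [PySem.Str.strip (PySem.Str.slice r (some (PySem.Str.len (kstr ++ "/"))) none)])) = _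
    rw [hL "/" '/' rfl]
  · rw [pvInnerA, List.find?_cons_of_neg
      (by simp only [str_sw_eq _ kstr "/" '/' rfl, hswFalse '/' (by rw [hc]; decide)]
          exact Bool.false_ne_true),
      List.find?_cons_of_pos
      (by rw [str_sw_eq _ kstr "_" '_' rfl]
          exact hswTrue '_' hc)]
    show (if PySem.Str.strip (PySem.Str.slice r (some (PySem.Str.len (kstr ++ "_"))) none) = "" then d
          else d.modify kstr []
            (fun l => l ++ [PySem.Str.strip (PySem.Str.slice r (some (PySem.Str.len (kstr ++ "_"))) none)])) = _
    rw [hL "_" '_' rfl]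
  · rw [pvInnerA, List.find?_cons_of_neg
      (by simp only [str_sw_eq _ kstr "/" '/' rfl, hswFalse '/' (by rw [hc]; decide)]
          exact Bool.false_ne_true),
      List.find?_cons_of_neg
      (by simp only [str_sw_eq _ kstr "_" '_' rfl, hswFalse '_' (by rw [hc]; decide)]
          exact Bool.false_ne_true),
      List.find?_cons_of_pos
      (by rw [str_sw_eq _ kstr "-" '-' rfl]
          exact hswTrue '-' hc)]
    show (if PySem.Str.strip (PySem.Str.slice r (some (PySem.Str.len (kstr ++ "-"))) none) = "" then d
          else d.modify kstr []
            (fun l => l ++ [PySem.Str.strip (PySem.Str.slice r (some (PySem.Str.len (kstr ++ "-"))) none)])) = _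
    rw [hL "-" '-' rfl]

-- main per-tag lemma: A's inner key loop equals B's parse-and-lookup
theorem core_eq (d : PySem.Dict String (List String)) (r : String) :
    pvInnerA d r (PySem.Str.lower r) pvKeysA =
      (match r.toList.findIdx? pvSep with
       | none => d
       | some i =>
         if pvKeysB.contains (PySem.Str.lower (PySem.Str.slice r none (some (i : Int)))) then
           (if PySem.Str.strip (PySem.Str.slice r (some ((i : Int) + 1)) none) = "" then d
            else d.modify (PySem.Str.lower (PySem.Str.slice r none (some (i : Int)))) []
              (fun l => l ++ [PySem.Str.strip (PySem.Str.slice r (some ((i : Int) + 1)) none)]))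
         else d) := by
  have hLL : (PySem.Str.lower r).toList = PySem.Chars.lower r.toList := PySem.Str.toList_lower r
  cases hfind : r.toList.findIdx? pvSep with
  | none =>
    have hnone : (PySem.Str.lower r).toList.findIdx? pvSep = none := by
      rw [hLL, findIdx_lower, hfind]
    simp only [pvKeysA]
    rw [innerA_skip_none _ _ _ _ hnone, innerA_skip_none _ _ _ _ hnone,
      innerA_skip_none _ _ _ _ hnone, innerA_skip_none _ _ _ _ hnone,
      innerA_skip_none _ _ _ _ hnone, innerA_skip_none _ _ _ _ hnone,
      innerA_skip_none _ _ _ _ hnone]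
    rfl
  | some i =>
    have hfindLL : (PySem.Str.lower r).toList.findIdx? pvSep = some i := by
      rw [hLL, findIdx_lower, hfind]
    obtain ⟨hlt, hPi, hmin⟩ := List.findIdx?_eq_some_iff_getElem.mp hfindLL
    have hkey : (PySem.Str.lower (PySem.Str.slice r none (some (i : Int)))).toList =
        (PySem.Str.lower r).toList.take i := by
      rw [PySem.Str.toList_lower, PySem.Str.toList_slice, PySem.Chars.slice_eq_listSlice,
        PySem.List.slice_to _ (by positivity : (0:Int) ≤ (i:Int))]
      have : ((i : Int)).toNat = i := rfl
      rw [this, hLL]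
      unfold PySem.Chars.lower
      rw [List.map_take]
    show pvInnerA d r (PySem.Str.lower r) pvKeysA =
      (if pvKeysB.contains (PySem.Str.lower (PySem.Str.slice r none (some (i : Int)))) then
         (if PySem.Str.strip (PySem.Str.slice r (some ((i : Int) + 1)) none) = "" then d
          else d.modify (PySem.Str.lower (PySem.Str.slice r none (some (i : Int)))) []
            (fun l => l ++ [PySem.Str.strip (PySem.Str.slice r (some ((i : Int) + 1)) none)]))
       else d)
    simp only [pvKeysA]
    by_cases h1 : (PySem.Str.lower r).toList.take i = "scarcity".toList
    · have hkeystr : PySem.Str.lower (PySem.Str.slice r none (some (i : Int))) = "scarcity" :=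
        String.toList_inj.mp (by rw [hkey, h1])
      rw [innerA_matched d r i "scarcity" ["necessity", "artificial", "orientation", "allocation", "cluster", "cluster_membership"] hfindLL h1]
      simp only [hkeystr]
      have hcont : pvKeysB.contains ("scarcity" : String) = true := by decide
      rw [hcont, if_pos rfl]
    by_cases h2 : (PySem.Str.lower r).toList.take i = "necessity".toList
    · have hkeystr : PySem.Str.lower (PySem.Str.slice r none (some (i : Int))) = "necessity" :=
        String.toList_inj.mp (by rw [hkey, h2])
      rw [innerA_skip d r i "scarcity" ["necessity", "artificial", "orientation", "allocation", "cluster", "cluster_membership"] (no_sep_of_all _ (by decide)) hfindLL h1]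
      rw [innerA_matched d r i "necessity" ["artificial", "orientation", "allocation", "cluster", "cluster_membership"] hfindLL h2]
      simp only [hkeystr]
      have hcont : pvKeysB.contains ("necessity" : String) = true := by decide
      rw [hcont, if_pos rfl]
    by_cases h3 : (PySem.Str.lower r).toList.take i = "artificial".toList
    · have hkeystr : PySem.Str.lower (PySem.Str.slice r none (some (i : Int))) = "artificial" :=
        String.toList_inj.mp (by rw [hkey, h3])
      rw [innerA_skip d r i "scarcity" ["necessity", "artificial", "orientation", "allocation", "cluster", "cluster_membership"] (no_sep_of_all _ (by decide)) hfindLL h1]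
      rw [innerA_skip d r i "necessity" ["artificial", "orientation", "allocation", "cluster", "cluster_membership"] (no_sep_of_all _ (by decide)) hfindLL h2]
      rw [innerA_matched d r i "artificial" ["orientation", "allocation", "cluster", "cluster_membership"] hfindLL h3]
      simp only [hkeystr]
      have hcont : pvKeysB.contains ("artificial" : String) = true := by decide
      rw [hcont, if_pos rfl]
    by_cases h4 : (PySem.Str.lower r).toList.take i = "orientation".toList
    · have hkeystr : PySem.Str.lower (PySem.Str.slice r none (some (i : Int))) = "orientation" :=
        String.toList_inj.mp (by rw [hkey, h4])
      rw [innerA_skip d r i "scarcity" ["necessity", "artificial", "orientation", "allocation", "cluster", "cluster_membership"] (no_sep_of_all _ (by decide)) hfindLL h1]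
      rw [innerA_skip d r i "necessity" ["artificial", "orientation", "allocation", "cluster", "cluster_membership"] (no_sep_of_all _ (by decide)) hfindLL h2]
      rw [innerA_skip d r i "artificial" ["orientation", "allocation", "cluster", "cluster_membership"] (no_sep_of_all _ (by decide)) hfindLL h3]
      rw [innerA_matched d r i "orientation" ["allocation", "cluster", "cluster_membership"] hfindLL h4]
      simp only [hkeystr]
      have hcont : pvKeysB.contains ("orientation" : String) = true := by decide
      rw [hcont, if_pos rfl]
    by_cases h5 : (PySem.Str.lower r).toList.take i = "allocation".toList
    · have hkeystr : PySem.Str.lower (PySem.Str.slice r none (some (i : Int))) = "allocation" :=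
        String.toList_inj.mp (by rw [hkey, h5])
      rw [innerA_skip d r i "scarcity" ["necessity", "artificial", "orientation", "allocation", "cluster", "cluster_membership"] (no_sep_of_all _ (by decide)) hfindLL h1]
      rw [innerA_skip d r i "necessity" ["artificial", "orientation", "allocation", "cluster", "cluster_membership"] (no_sep_of_all _ (by decide)) hfindLL h2]
      rw [innerA_skip d r i "artificial" ["orientation", "allocation", "cluster", "cluster_membership"] (no_sep_of_all _ (by decide)) hfindLL h3]
      rw [innerA_skip d r i "orientation" ["allocation", "cluster", "cluster_membership"] (no_sep_of_all _ (by decide)) hfindLL h4]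
      rw [innerA_matched d r i "allocation" ["cluster", "cluster_membership"] hfindLL h5]
      simp only [hkeystr]
      have hcont : pvKeysB.contains ("allocation" : String) = true := by decide
      rw [hcont, if_pos rfl]
    by_cases h6 : (PySem.Str.lower r).toList.take i = "cluster".toList
    · have hkeystr : PySem.Str.lower (PySem.Str.slice r none (some (i : Int))) = "cluster" :=
        String.toList_inj.mp (by rw [hkey, h6])
      rw [innerA_skip d r i "scarcity" ["necessity", "artificial", "orientation", "allocation", "cluster", "cluster_membership"] (no_sep_of_all _ (by decide)) hfindLL h1]
      rw [innerA_skip d r i "necessity" ["artificial", "orientation", "allocation", "cluster", "cluster_membership"] (no_sep_of_all _ (by decide)) hfindLL h2]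
      rw [innerA_skip d r i "artificial" ["orientation", "allocation", "cluster", "cluster_membership"] (no_sep_of_all _ (by decide)) hfindLL h3]
      rw [innerA_skip d r i "orientation" ["allocation", "cluster", "cluster_membership"] (no_sep_of_all _ (by decide)) hfindLL h4]
      rw [innerA_skip d r i "allocation" ["cluster", "cluster_membership"] (no_sep_of_all _ (by decide)) hfindLL h5]
      rw [innerA_matched d r i "cluster" ["cluster_membership"] hfindLL h6]
      simp only [hkeystr]
      have hcont : pvKeysB.contains ("cluster" : String) = true := by decide
      rw [hcont, if_pos rfl]
    -- no key matches: A skips every key, B finds none in the dict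
    rw [innerA_skip d r i "scarcity" ["necessity", "artificial", "orientation", "allocation", "cluster", "cluster_membership"] (no_sep_of_all _ (by decide)) hfindLL h1]
    rw [innerA_skip d r i "necessity" ["artificial", "orientation", "allocation", "cluster", "cluster_membership"] (no_sep_of_all _ (by decide)) hfindLL h2]
    rw [innerA_skip d r i "artificial" ["orientation", "allocation", "cluster", "cluster_membership"] (no_sep_of_all _ (by decide)) hfindLL h3]
    rw [innerA_skip d r i "orientation" ["allocation", "cluster", "cluster_membership"] (no_sep_of_all _ (by decide)) hfindLL h4]
    rw [innerA_skip d r i "allocation" ["cluster", "cluster_membership"] (no_sep_of_all _ (by decide)) hfindLL h5]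
    rw [innerA_skip d r i "cluster" ["cluster_membership"] (no_sep_of_all _ (by decide)) hfindLL h6]
    rw [innerA_skip_cm d r i [] hfindLL h6]
    have hcont : pvKeysB.contains (PySem.Str.lower (PySem.Str.slice r none (some (i : Int)))) = false := by
      rw [Bool.eq_false_iff]
      intro hmem
      have hmem' := List.contains_iff_mem.mp hmem
      simp only [pvKeysB, List.mem_cons, List.not_mem_nil, or_false] at hmem'
      have htk := hkey
      rcases hmem' with h | h | h | h | h | h | h <;> rw [h] at htk
      · exact h1 htk.symm
      · exact h2 htk.symm
      · exact h3 htk.symm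
      · exact h4 htk.symm
      · exact h5 htk.symm
      · exact h6 htk.symm
      · -- key = "cluster_membership" is impossible: '_' at position 7 precedes i
        have hlen18 : i = 18 := by
          have hl := congrArg List.length htk.symm
          rw [List.length_take] at hl
          have hm : min i (PySem.Str.lower r).toList.length = 18 := by simpa using hl
          omega
        have hget7 : (PySem.Str.lower r).toList[7]? = some '_' := by
          have e : ((PySem.Str.lower r).toList.take i)[7]? = (PySem.Str.lower r).toList[7]? := by
            rw [List.getElem?_take]
            simp [hlen18]
          rw [← e, htk.symm]
          simp
        obtain ⟨h7lt, h7eq⟩ := List.getElem?_eq_some_iff.mp hget7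
        have := hmin 7 (by omega)
        rw [h7eq] at this
        exact this (by decide)
    show pvInnerA d r (PySem.Str.lower r) [] = _
    rw [hcont, if_neg (by simp)]
    rfl

theorem step_eq (d : PySem.Dict String (List String)) (tag : String) :
    pvStepA d tag = pvStepB d tag := by
  unfold pvStepA pvStepB
  exact core_eq d (PySem.Str.strip tag)

-- ===== VERDICT (by name: the statement is the Claim_ definition above) =====
theorem extract_structured_tags_py_spec : Claim_equal_extract_structured_tags_py := by
  intro tags _
  unfold Spec_extract_structured_tags_py extract_structured_tags_py extract_structured_tags_py_alt
  rw [show pvStepA = pvStepB from funext (fun d => funext (step_eq d))]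
  rfl
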